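-- pv_equiv track=rewrite | github.com/Zalaid/Xploiteye_copy | Xploiteye-backend/app/utils/mfa.py | use_recovery_code
-- ===== SOURCE A (Python) =====
-- from typing import List, Optional
--
-- def use_recovery_code(stored_codes: List[str], provided_code: str) -> tuple[bool, List[str]]:
--     """
--     Use a recovery code (mark as used and return updated list)
--     Returns (success, updated_codes_list)
--     """
--     if not stored_codes or not provided_code:
--         return False, stored_codes
--
--     # Normalize the provided code
--     normalized_code = provided_code.replace(" ", "").replace("-", "").upper()
--
--     updated_codes = []
--     used = False
--
--     for stored_code in stored_codes:
--         if stored_code and stored_code.replace("-", "").upper() == normalized_code and not used: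
--             # Mark this code as used (set to None or empty string)
--             updated_codes.append(None)
--             used = True
--         else:
--             updated_codes.append(stored_code)
--
--     return used, updated_codes
-- ===== SOURCE B (Python) =====
-- from typing import List, Optional
--
-- def use_recovery_code(stored_codes: List[str], provided_code: str) -> tuple[bool, List[str]]:
--     if not stored_codes or not provided_code:
--         return False, stored_codes
--     normalized = provided_code.replace(" ", "").replace("-", "").upper()
--     # hash index: normalized stored code -> index of its FIRST occurrence
--     first_index = {}
--     for i, code in enumerate(stored_codes):
--         if code:
--             first_index.setdefault(code.replace("-", "").upper(), i)
--     idx = first_index.get(normalized)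
--     if idx is None:
--         return False, list(stored_codes)
--     updated = list(stored_codes)
--     updated[idx] = None
--     return True, updated
-- ===== Notes on version B (the rewrite author's own statement) =====
-- stated objective: alternative
-- what changed: Instead of A's single flag-carrying scan that rebuilds the list, B builds a dictionary mapping each normalized stored code to its first index, answers the query with one dict lookup, and sets that one position to None in a copy.
import Mathlib
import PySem

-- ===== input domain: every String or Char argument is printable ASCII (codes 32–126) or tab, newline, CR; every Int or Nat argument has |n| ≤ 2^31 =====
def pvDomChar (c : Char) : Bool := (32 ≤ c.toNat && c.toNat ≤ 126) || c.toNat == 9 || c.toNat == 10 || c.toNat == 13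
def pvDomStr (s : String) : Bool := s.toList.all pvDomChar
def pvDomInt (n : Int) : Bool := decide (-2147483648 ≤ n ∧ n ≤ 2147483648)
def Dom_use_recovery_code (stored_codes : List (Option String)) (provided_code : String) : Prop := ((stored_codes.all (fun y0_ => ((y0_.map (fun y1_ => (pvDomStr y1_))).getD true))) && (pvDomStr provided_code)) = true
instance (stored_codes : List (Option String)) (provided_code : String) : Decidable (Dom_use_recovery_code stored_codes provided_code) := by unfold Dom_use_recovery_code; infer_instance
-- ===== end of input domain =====

-- B answers the query via a hash index (normalized code -> first index) built once, then sets one position, instead of A's flag-carrying scan that rebuilds the list (return value only).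


-- `c.replace("-","").upper()` — normalization applied to a stored code
def pvNorm (s : String) : String := PySem.Str.upper (PySem.Str.replace s "-" "")

-- ===== PORT A =====
-- A's loop body: append None on the first un-used match, else append the code unchanged
def pvStepA (norm : String) (st : List (Option String) × Bool) (c : Option String) : List (Option String) × Bool :=
  if (match c with
      | none => false
      | some s => (!(s = "")) && (pvNorm s = norm)) && !st.2
  then (st.1 ++ [none], true) else (st.1 ++ [c], st.2)

def use_recovery_code (stored_codes : List (Option String)) (provided_code : String) : Bool × List (Option String) :=
  if stored_codes = [] ∨ provided_code = "" then (false, stored_codes)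
  else
    let normalized := pvNorm (PySem.Str.replace provided_code " " "")
    let r := stored_codes.foldl (pvStepA normalized) ([], false)
    (r.2, r.1)

-- ===== PORT B =====
-- Source B's loop body: `if code: first_index.setdefault(code.replace("-","").upper(), i)`
def pvIndexStep (d : PySem.Dict String Int) (p : Int × Option String) : PySem.Dict String Int :=
  match p.2 with
  | none => d
  | some s => if s = "" then d else d.setdefault (pvNorm s) p.1

def use_recovery_code_alt (stored_codes : List (Option String)) (provided_code : String) : Bool × List (Option String) :=
  if stored_codes = [] ∨ provided_code = "" then (false, stored_codes)
  else
    let normalized := pvNorm (PySem.Str.replace provided_code " " "")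
    let first_index := (PySem.List.enumerate stored_codes 0).foldl pvIndexStep PySem.Dict.empty
    match first_index.get? normalized with
    | none => (false, stored_codes)
    | some i => (true, stored_codes.set i.toNat none)  -- i is an enumerate index, hence ≥ 0: updated[i] = None

-- ===== PRECONDITION & SPEC =====
def Spec_use_recovery_code (stored_codes : List (Option String)) (provided_code : String) (out : Bool × List (Option String)) : Prop := out = use_recovery_code_alt stored_codes provided_code
instance (stored_codes : List (Option String)) (provided_code : String) (out : Bool × List (Option String)) : Decidable (Spec_use_recovery_code stored_codes provided_code out) := by unfold Spec_use_recovery_code; infer_instance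

-- ===== CLAIM (what is proved, stated in full; the proofs are below) =====
def Claim_equal_use_recovery_code : Prop := ∀ (stored_codes : List (Option String)) (provided_code : String), Dom_use_recovery_code stored_codes provided_code → Spec_use_recovery_code stored_codes provided_code (use_recovery_code stored_codes provided_code)

-- ===== LEMMAS AND PROOFS =====

-- index of the first code matching `norm` (the value both sides converge on)
def pvFindMatch (norm : String) : List (Option String) → Option Nat
  | [] => none
  | c :: rest =>
    if (match c with
        | none => false
        | some s => (!(s = "")) && (pvNorm s = norm))
    then some 0 else (pvFindMatch norm rest).map (· + 1)

-- once used = true, A's loop just copies the remaining codes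
theorem foldl_stepA_used (norm : String) :
    ∀ (l acc : List (Option String)),
      List.foldl (pvStepA norm) (acc, true) l = (acc ++ l, true) := by
  intro l
  induction l with
  | nil => intro acc; simp
  | cons c rest ih =>
    intro acc
    have : pvStepA norm (acc, true) c = (acc ++ [c], true) := by
      simp [pvStepA]
    rw [List.foldl_cons, this, ih]
    simp

-- A's loop from (acc, false) = find first match, then set it to None
theorem foldl_stepA_main (norm : String) :
    ∀ (l acc : List (Option String)),
      List.foldl (pvStepA norm) (acc, false) l =
        match pvFindMatch norm l with
        | none => (acc ++ l, false)
        | some i => (acc ++ l.set i none, true) := by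
  intro l
  induction l with
  | nil => intro acc; simp [pvFindMatch]
  | cons c rest ih =>
    intro acc
    by_cases h : (match c with
        | none => false
        | some s => (!(s = "")) && (pvNorm s = norm)) = true
    · have h1 : pvStepA norm (acc, false) c = (acc ++ [none], true) := by
        simp [pvStepA, h]
      rw [List.foldl_cons, h1, foldl_stepA_used]
      simp [pvFindMatch, h]
    · have h1 : pvStepA norm (acc, false) c = (acc ++ [c], false) := by
        simp [pvStepA, h]
      rw [List.foldl_cons, h1, ih]
      cases hf : pvFindMatch norm rest with
      | none => simp [pvFindMatch, h, hf]
      | some i => simp [pvFindMatch, h, hf, List.set_cons_succ]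

-- B's index-building loop: lookup of `norm` = existing entry, else first match in `l`, offset by the start index
theorem foldl_indexStep (norm : String) :
    ∀ (l : List (Option String)) (k : Int) (d : PySem.Dict String Int),
      (List.foldl pvIndexStep d (PySem.List.enumerate l k)).get? norm =
        match d.get? norm with
        | some v => some v
        | none => (pvFindMatch norm l).map (fun n => k + (n : Int)) := by
  intro l
  induction l with
  | nil => intro k d; cases h : d.get? norm <;> simp [PySem.List.enumerate_nil, pvFindMatch, h]
  | cons c rest ih =>
    intro k d
    rw [PySem.List.enumerate_cons, List.foldl_cons]
    cases c with
    | none =>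
      rw [ih]
      cases h : d.get? norm with
      | some v => simp [pvIndexStep, h]
      | none =>
        simp only [pvIndexStep, h]
        cases hf : pvFindMatch norm rest <;>
          simp [pvFindMatch, hf] <;> (try ring)
    | some s =>
      by_cases hs : s = ""
      · rw [show pvIndexStep d (k, some s) = d by simp [pvIndexStep, hs], ih]
        cases h : d.get? norm with
        | some v => simp [h]
        | none =>
          simp only [h]
          cases hf : pvFindMatch norm rest <;>
            simp [pvFindMatch, hs, hf] <;> (try ring)
      · by_cases hn : pvNorm s = norm
        · rw [show pvIndexStep d (k, some s) = d.setdefault norm k by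
            simp [pvIndexStep, hs, hn], ih]
          rw [PySem.Dict.get?_setdefault_self]
          cases h : d.get? norm with
          | some v => simp [h]
          | none => simp [pvFindMatch, hs, hn]
        · rw [show pvIndexStep d (k, some s) = d.setdefault (pvNorm s) k by
            simp [pvIndexStep, hs], ih]
          rw [PySem.Dict.get?_setdefault_of_ne d k (Ne.symm hn)]
          cases h : d.get? norm with
          | some v => simp [h]
          | none =>
            simp only [h]
            cases hf : pvFindMatch norm rest <;>
              (simp [pvFindMatch, hs, hn, hf]; try ring)

-- ===== VERDICT (by name: the statement is the Claim_ definition above) =====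
theorem use_recovery_code_spec : Claim_equal_use_recovery_code := by
  intro stored_codes provided_code _
  unfold Spec_use_recovery_code use_recovery_code use_recovery_code_alt
  by_cases hg : stored_codes = [] ∨ provided_code = ""
  · simp [hg]
  · rw [if_neg hg, if_neg hg]
    simp only
    rw [foldl_stepA_main, foldl_indexStep]
    rw [PySem.Dict.get?_empty]
    cases hf : pvFindMatch (pvNorm (PySem.Str.replace provided_code " " "")) stored_codes with
    | none => simp
    | some i => simp
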